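-- pv_equiv track=rewrite | github.com/rainhaworth/16S-Mutation-Classifiers | utils.py | find_homopolymer
-- ===== SOURCE A (Python) =====
-- def find_homopolymer(seq, shortest_homopolymer_len=4):
--     L = len(seq)
--     homopolymers = [0,0,0,0]
--     i = 0
--
--     while i < L - shortest_homopolymer_len + 1:
--         base = seq[i]
--         homopolymer = base
--         for j in range(i+1,L):
--             if seq[j] == base:
--                 homopolymer += base
--             else:
--                 break
--         i = j
--         if len(homopolymer) >= shortest_homopolymer_len:
--             NT = list(set(homopolymer))[0]
--             if NT == 'A': homopolymers[0] += 1
--             elif NT == 'C': homopolymers[1] += 1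
--             elif NT == 'G': homopolymers[2] += 1
--             elif NT == 'U': homopolymers[3] += 1
--
--     return homopolymers
-- ===== SOURCE B (Python) =====
-- def find_homopolymer(seq, shortest_homopolymer_len=4):
--     # single left-to-right pass: keep the current run's base and an integer length
--     a_runs = c_runs = g_runs = u_runs = 0
--     prev = None
--     run_len = 0
--     for ch in seq:
--         if ch == prev:
--             run_len += 1
--             continue
--         if run_len >= shortest_homopolymer_len:
--             if prev == 'A': a_runs += 1
--             elif prev == 'C': c_runs += 1
--             elif prev == 'G': g_runs += 1
--             elif prev == 'U': u_runs += 1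
--         prev = ch
--         run_len = 1
--     if run_len >= shortest_homopolymer_len:
--         if prev == 'A': a_runs += 1
--         elif prev == 'C': c_runs += 1
--         elif prev == 'G': g_runs += 1
--         elif prev == 'U': u_runs += 1
--     return [a_runs, c_runs, g_runs, u_runs]
-- ===== Notes on version B (the rewrite author's own statement) =====
-- stated objective: faster
-- what changed: B replaces A's while-loop with an inner rescanning for-loop that rebuilds each run as a growing string (quadratic string concatenation on long runs, plus a set() per run) by a single left-to-right pass keeping only the current run's base and an integer length counter.
-- outside the precondition, e.g. on find_homopolymer('', 1): A returns [0, 0, 0, 0], B returns [0, 0, 0, 0]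
import Mathlib
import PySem

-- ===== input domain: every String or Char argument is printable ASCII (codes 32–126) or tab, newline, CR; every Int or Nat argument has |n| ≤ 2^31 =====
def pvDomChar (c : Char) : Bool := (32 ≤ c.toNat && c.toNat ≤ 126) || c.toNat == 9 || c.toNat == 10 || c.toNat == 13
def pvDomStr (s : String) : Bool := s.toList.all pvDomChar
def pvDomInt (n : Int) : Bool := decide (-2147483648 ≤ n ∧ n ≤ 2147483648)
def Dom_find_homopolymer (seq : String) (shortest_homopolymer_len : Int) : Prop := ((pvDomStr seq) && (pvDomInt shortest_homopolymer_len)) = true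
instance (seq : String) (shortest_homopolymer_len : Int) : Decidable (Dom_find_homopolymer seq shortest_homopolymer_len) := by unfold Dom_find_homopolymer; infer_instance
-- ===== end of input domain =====

-- B replaces A's inner rescanning loop (which rebuilds each run as a growing string and
-- takes a set() of it) by a single pass keeping only the current run's base and an integer
-- length counter; objective: faster on long runs.

-- ===== PORT A =====

-- counts[idx] += 1 (idx is always 0..3 here, so getD/set are exact)
def pvIncr (counts : List Int) (idx : Nat) : List Int :=
  counts.set idx (counts.getD idx 0 + 1)

-- the inner 'for j in range(i+1, L): if seq[j] == base: homopolymer += base else: break'.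
-- State: remaining indices, homopolymer, and the current value of j (unchanged if the range
-- is empty, = Python's leftover j).  seq[j] is always in range here, so .getD ' ' is exact.
def pvInnerA (cs : List Char) (base : Char) : List Int → List Char → Int → (List Char × Int)
  | [], hp, j => (hp, j)
  | jj :: rest, hp, _j =>
    if (PySem.List.pyGet? cs jj).getD ' ' = base then
      pvInnerA cs base rest (hp ++ [base]) jj
    else (hp, jj)

-- the outer 'while i < L - shortest_homopolymer_len + 1' over state (i, j, homopolymers);
-- fuel L+1 suffices whenever the threshold is ≥ 2 (i then strictly increases; Pre_ below).
def pvOuterA (cs : List Char) (k : Int) : Nat → Int → Int → List Int → List Int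
  | 0, _i, _j, counts => counts
  | fuel+1, i, j, counts =>
    if i < (cs.length : Int) - k + 1 then
      let base := (PySem.List.pyGet? cs i).getD ' '
      let r := pvInnerA cs base (PySem.List.pyRange (i + 1) (cs.length : Int) 1) [base] j
      let counts' :=
        if k ≤ (r.1.length : Int) then
          -- NT = list(set(homopolymer))[0]; the run is a singleton set, so [0] is exact
          let nt := (PySem.List.pyGet? (PySem.Set.ofList r.1) 0).getD ' '
          if nt = 'A' then pvIncr counts 0
          else if nt = 'C' then pvIncr counts 1
          else if nt = 'G' then pvIncr counts 2
          else if nt = 'U' then pvIncr counts 3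
          else counts
        else counts
      pvOuterA cs k fuel r.2 r.2 counts'
    else counts

def find_homopolymer (seq : String) (shortest_homopolymer_len : Int) : List Int :=
  pvOuterA seq.toList shortest_homopolymer_len (seq.toList.length + 1) 0 0 [0, 0, 0, 0]

-- ===== PORT B =====

-- the run-flush: 'if run_len >= shortest_homopolymer_len: if prev == ...' over (a,c,g,u)
def pvRunBump (k : Int) (prev : Option Char) (run : Int) (st : Int × Int × Int × Int) : Int × Int × Int × Int :=
  if k ≤ run then
    if prev = some 'A' then (st.1 + 1, st.2.1, st.2.2.1, st.2.2.2)
    else if prev = some 'C' then (st.1, st.2.1 + 1, st.2.2.1, st.2.2.2)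
    else if prev = some 'G' then (st.1, st.2.1, st.2.2.1 + 1, st.2.2.2)
    else if prev = some 'U' then (st.1, st.2.1, st.2.2.1, st.2.2.2 + 1)
    else st
  else st

-- the 'for ch in seq' loop over state (prev, run_len, counters), ending with the final flush
def pvScanB (k : Int) : List Char → Option Char → Int → (Int × Int × Int × Int) → (Int × Int × Int × Int)
  | [], prev, run, st => pvRunBump k prev run st
  | ch :: rest, prev, run, st =>
    if some ch = prev then pvScanB k rest prev (run + 1) st
    else pvScanB k rest (some ch) 1 (pvRunBump k prev run st)

def find_homopolymer_alt (seq : String) (shortest_homopolymer_len : Int) : List Int :=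
  let st := pvScanB shortest_homopolymer_len seq.toList none 0 (0, 0, 0, 0)
  [st.1, st.2.1, st.2.2.1, st.2.2.2]

-- ===== PRECONDITION & SPEC =====
-- Pre_ excludes thresholds below 2: there A raises (UnboundLocalError on a length-1 string,
-- IndexError on the empty string with threshold ≤ 0) or loops forever (length ≥ 2); the only
-- such input A returns on is the empty string with threshold 1, where A and B agree anyway.
def Pre_find_homopolymer (_seq : String) (shortest_homopolymer_len : Int) : Prop :=
  2 ≤ shortest_homopolymer_len
instance (seq : String) (shortest_homopolymer_len : Int) : Decidable (Pre_find_homopolymer seq shortest_homopolymer_len) := by unfold Pre_find_homopolymer; infer_instance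

def pvWitness_find_homopolymer : String × Int := ("AAAAGGGUUUUC", 4)

def Spec_find_homopolymer (seq : String) (shortest_homopolymer_len : Int) (out : List Int) : Prop := out = find_homopolymer_alt seq shortest_homopolymer_len
instance (seq : String) (shortest_homopolymer_len : Int) (out : List Int) : Decidable (Spec_find_homopolymer seq shortest_homopolymer_len out) := by unfold Spec_find_homopolymer; infer_instance

-- ===== CLAIM (what is proved, stated in full; the proofs are below) =====
def Claim_equal_find_homopolymer : Prop := ∀ (seq : String) (shortest_homopolymer_len : Int), Dom_find_homopolymer seq shortest_homopolymer_len → Pre_find_homopolymer seq shortest_homopolymer_len → Spec_find_homopolymer seq shortest_homopolymer_len (find_homopolymer seq shortest_homopolymer_len)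

-- ===== LEMMAS AND PROOFS =====

-- reference: peel one maximal run at a time, flush it through pvRunBump
def pvSpecGo (k : Int) : List Char → (Int × Int × Int × Int) → (Int × Int × Int × Int)
  | [], st => st
  | c :: rest, st =>
    pvSpecGo k (rest.drop (rest.takeWhile (· = c)).length)
      (pvRunBump k (some c) (((rest.takeWhile (· = c)).length : Nat) + 1) st)
  termination_by l => l.length
  decreasing_by simp [List.length_drop]

def pvToList4 (st : Int × Int × Int × Int) : List Int := [st.1, st.2.1, st.2.2.1, st.2.2.2]

theorem pvRunBump_none (k : Int) (run : Int) (st : Int × Int × Int × Int) :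
    pvRunBump k none run st = st := by
  unfold pvRunBump; split_ifs <;> simp_all

theorem pvRunBump_small (k : Int) (p : Option Char) (run : Int) (st : Int × Int × Int × Int)
    (h : run < k) : pvRunBump k p run st = st := by
  unfold pvRunBump; rw [if_neg (by omega)]

theorem pv_takeWhile_replicate_ne (c d : Char) (hne : d ≠ c) (n : Nat) (l : List Char) :
    (List.replicate n c ++ d :: l).takeWhile (· = c) = List.replicate n c := by
  induction n with
  | zero => simp [hne]
  | succ m ih => simp [List.replicate_succ, ih]

theorem pvScanB_run (k : Int) : ∀ (l : List Char) (c : Char) (n : Nat) (st : Int × Int × Int × Int),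
    pvScanB k l (some c) ((n : Int) + 1) st = pvSpecGo k (List.replicate (n + 1) c ++ l) st := by
  intro l
  induction l with
  | nil =>
    intro c n st
    rw [List.append_nil, List.replicate_succ, pvSpecGo.eq_2]
    simp [pvScanB, List.drop_replicate, pvSpecGo]
  | cons d l' ih =>
    intro c n st
    by_cases hdc : d = c
    · subst hdc
      have h1 : (n : Int) + 1 + 1 = ((n + 1 : Nat) : Int) + 1 := by push_cast; ring
      have h2 : List.replicate (n + 1) d ++ d :: l' = List.replicate (n + 1 + 1) d ++ l' := by
        rw [List.replicate_succ' (n := n + 1) (a := d)]; simp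
      simp only [pvScanB, h1, ih, h2]
      simp
    · have h2 : List.replicate (n + 1) c ++ d :: l' = c :: (List.replicate n c ++ d :: l') := by
        rw [List.replicate_succ]; simp
      have h3 : pvScanB k (d :: l') (some c) ((n : Int) + 1) st
          = pvScanB k l' (some d) (((0 : Nat) : Int) + 1) (pvRunBump k (some c) ((n : Int) + 1) st) := by
        simp [pvScanB, hdc]
      rw [h3, ih, h2, pvSpecGo.eq_2,
        pv_takeWhile_replicate_ne c d hdc, List.length_replicate]
      have h4 : (List.replicate n c ++ d :: l').drop n = d :: l' := by simp
      rw [h4]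
      simp

theorem pvScanB_none (k : Int) : ∀ (l : List Char) (st : Int × Int × Int × Int),
    pvScanB k l none 0 st = pvSpecGo k l st := by
  intro l st
  cases l with
  | nil => simp [pvScanB, pvSpecGo, pvRunBump_none]
  | cons c l' =>
    have h : pvScanB k (c :: l') none 0 st
        = pvScanB k l' (some c) (((0 : Nat) : Int) + 1) st := by
      simp [pvScanB, pvRunBump_none]
    rw [h, pvScanB_run]
    simp

theorem pvSpecGo_short (k : Int) : ∀ (n : Nat) (suf : List Char) (st : Int × Int × Int × Int),
    suf.length ≤ n → (suf.length : Int) < k → pvSpecGo k suf st = st := by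
  intro n
  induction n with
  | zero =>
    intro suf st h _
    have : suf = [] := List.eq_nil_of_length_eq_zero (by omega)
    subst this; rw [pvSpecGo]
  | succ m ih =>
    intro suf st h hk
    cases suf with
    | nil => rw [pvSpecGo]
    | cons c rest =>
      rw [pvSpecGo.eq_2]
      have hle := (List.takeWhile_sublist (l := rest) (fun x => decide (x = c))).length_le
      rw [pvRunBump_small _ _ _ _ (by
        simp only [List.length_cons] at hk; push_cast; omega)]
      exact ih _ st (by simp only [List.length_cons] at h; simp; omega)
        (by simp only [List.length_cons] at hk; simp; push_cast at hk ⊢; omega)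

theorem pvSet_ofList_replicate (d : Char) (n : Nat) :
    PySem.Set.ofList (List.replicate (n + 1) d) = [d] := by
  have key : ∀ m (s : List Char), d ∈ s → (List.replicate m d).foldl PySem.Set.add s = s := by
    intro m
    induction m with
    | zero => intro s _; rfl
    | succ p ih =>
      intro s hs
      rw [List.replicate_succ, List.foldl_cons]
      have hadd : PySem.Set.add s d = s := by
        simp [PySem.Set.add, PySem.Set.contains, hs]
      rw [hadd]; exact ih s hs
  rw [PySem.Set.ofList_eq_foldl, List.replicate_succ, List.foldl_cons]
  have h0 : PySem.Set.add ([] : List Char) d = [d] := by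
    simp [PySem.Set.add, PySem.Set.contains]
  rw [h0]; exact key n [d] (by simp)

theorem pvInnerA_spec (base : Char) : ∀ (suf pre hp : List Char) (j0 : Int),
    pvInnerA (pre ++ suf) base
      (PySem.List.pyRange ((pre.length : Int)) (((pre ++ suf).length : Int)) 1) hp j0
    = (hp ++ List.replicate (suf.takeWhile (· = base)).length base,
       if (suf.takeWhile (· = base)).length < suf.length
       then (pre.length : Int) + ((suf.takeWhile (· = base)).length : Int)
       else if suf.length = 0 then j0 else (pre.length : Int) + (suf.length : Int) - 1) := by
  intro suf
  induction suf with
  | nil =>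
    intro pre hp j0
    rw [List.append_nil, PySem.List.pyRange_one_eq_nil (le_refl _)]
    simp [pvInnerA]
  | cons d suf' ih =>
    intro pre hp j0
    have hlt : (pre.length : Int) < ((pre ++ d :: suf').length : Int) := by
      simp only [List.length_append, List.length_cons]; push_cast; omega
    rw [PySem.List.pyRange_one_cons hlt, pvInnerA, PySem.List.pyGet?_append_length]
    simp only [Option.getD_some]
    by_cases hd : d = base
    · subst hd
      rw [if_pos rfl]
      have e1 : pre ++ d :: suf' = (pre ++ [d]) ++ suf' := by simp
      have e2 : (pre.length : Int) + 1 = (((pre ++ [d]).length : Nat) : Int) := by simp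
      rw [e1, e2, ih (pre ++ [d]) (hp ++ [d]) (pre.length : Int)]
      rw [Prod.mk.injEq]
      constructor
      · simp [List.takeWhile_cons, List.replicate_succ]
      · simp only [List.takeWhile_cons, decide_true, if_pos rfl]
        simp only [List.length_cons, List.length_append, List.length_nil,
          List.length_replicate]
        split_ifs <;>
          (try simp only [List.length_cons, List.length_append, List.length_nil,
            List.length_replicate] at *) <;> push_cast at * <;> omega
    · rw [if_neg (by simpa using hd)]
      have ht : List.takeWhile (fun x => decide (x = base)) (d :: suf') = [] := by
        simp [List.takeWhile_cons, hd]
      rw [ht]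
      simp

theorem pv_takeWhile_take (p : Char → Bool) : ∀ l : List Char,
    l.take (l.takeWhile p).length = l.takeWhile p := by
  intro l
  induction l with
  | nil => rfl
  | cons a l ih => by_cases h : p a <;> simp [List.takeWhile_cons, h, ih]

theorem pvIncr_bump (k a c g u n : Int) (d : Char) :
    (if k ≤ n then
      (if d = 'A' then pvIncr [a, c, g, u] 0
       else if d = 'C' then pvIncr [a, c, g, u] 1
       else if d = 'G' then pvIncr [a, c, g, u] 2
       else if d = 'U' then pvIncr [a, c, g, u] 3
       else [a, c, g, u])
     else [a, c, g, u]) = pvToList4 (pvRunBump k (some d) n (a, c, g, u)) := by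
  simp only [pvRunBump, pvToList4, pvIncr, Option.some.injEq]
  split_ifs <;> rfl

theorem pvOuterA_spec (k : Int) (hk : 2 ≤ k) :
    ∀ (fuel : Nat) (pre suf : List Char) (j0 a c g u : Int),
    suf.length + 1 ≤ fuel →
    pvOuterA (pre ++ suf) k fuel (pre.length : Int) j0 [a, c, g, u]
      = pvToList4 (pvSpecGo k suf (a, c, g, u)) := by
  intro fuel
  induction fuel with
  | zero => intro pre suf j0 a c g u h; omega
  | succ f ih =>
    intro pre suf j0 a c g u h
    by_cases hcond : (pre.length : Int) < ((pre ++ suf).length : Int) - k + 1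
    case neg =>
      rw [pvOuterA, if_neg hcond]
      have hshort : ((suf.length : Int)) < k := by
        simp only [List.length_append] at hcond; push_cast at hcond; omega
      rw [pvSpecGo_short k suf.length suf _ le_rfl hshort]
      rfl
    case pos =>
      have hks : k ≤ (suf.length : Int) := by
        simp only [List.length_append] at hcond; push_cast at hcond; omega
      cases suf with
      | nil => simp at hks; omega
      | cons d suf' =>
        simp only [pvOuterA, if_pos hcond, PySem.List.pyGet?_append_length, Option.getD_some]
        have e1 : pre ++ d :: suf' = (pre ++ [d]) ++ suf' := by simp
        have e2 : (pre.length : Int) + 1 = (((pre ++ [d]).length : Nat) : Int) := by simp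
        rw [e1, e2, pvInnerA_spec d suf' (pre ++ [d]) [d] j0]
        set t := (List.takeWhile (fun x => decide (x = d)) suf').length with ht
        have htle : t ≤ suf'.length :=
          (List.takeWhile_sublist (l := suf') (fun x => decide (x = d))).length_le
        have hrep : ([d] ++ List.replicate t d) = List.replicate (t + 1) d := by
          rw [List.replicate_succ]; rfl
        have hnt : (PySem.List.pyGet?
            (PySem.Set.ofList ([d] ++ List.replicate t d)) 0).getD ' ' = d := by
          rw [hrep, pvSet_ofList_replicate]; rfl
        simp only [hnt, List.length_append, List.length_replicate, List.length_cons,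
          List.length_nil]
        have hlen : ((1 + t : Nat) : Int) = (t : Int) + 1 := by push_cast; ring
        rw [hlen, pvIncr_bump]
        rcases hb : pvRunBump k (some d) ((t : Int) + 1) (a, c, g, u) with ⟨a2, c2, g2, u2⟩
        rw [pvSpecGo.eq_2, ← ht]
        have hdrop : suf'.drop t = List.drop t (List.take t suf' ++ List.drop t suf') := by
          rw [List.take_append_drop]
        by_cases hlt : t < suf'.length
        · rw [if_pos hlt]
          -- recompose pre ++ d :: suf' around the boundary after the run
          have htt : List.take t suf' = List.takeWhile (fun x => decide (x = d)) suf' := by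
            rw [ht]; exact pv_takeWhile_take _ _
          have hsd : List.takeWhile (fun x => decide (x = d)) suf' ++ suf'.drop t = suf' := by
            rw [← htt, List.take_append_drop]
          have hsplit : (pre ++ [d]) ++ suf'
              = ((pre ++ [d]) ++ List.takeWhile (fun x => decide (x = d)) suf')
                ++ suf'.drop t := by
            simp only [List.append_assoc]; rw [hsd]
          have hfuel : (List.drop t suf').length + 1 ≤ f := by
            simp only [List.length_cons] at h
            have : (suf'.drop t).length = suf'.length - t := by simp
            omega
          rw [hsplit, hb]
          convert ih ((pre ++ [d]) ++ List.takeWhile (fun x => decide (x = d)) suf')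
            (List.drop t suf') (((pre ++ [d]).length : Int) + (t : Int)) a2 c2 g2 u2 hfuel using 2 <;>
            (try simp only [List.append_assoc, List.length_append, List.length_cons,
              List.length_nil, ← ht]) <;> (try push_cast) <;> (try omega) <;> rfl
        · rw [if_neg hlt]
          have hteq : t = suf'.length := by omega
          have h0 : suf'.length ≠ 0 := by
            simp only [List.length_cons] at hks; push_cast at hks; omega
          rw [if_neg h0]
          obtain ⟨f2, rfl⟩ : ∃ f2, f = f2 + 1 :=
            ⟨f - 1, by simp only [List.length_cons] at h; omega⟩
          rw [pvOuterA, if_neg (by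
            simp only [List.length_append, List.length_cons, List.length_nil]
            push_cast
            omega)]
          rw [hteq, List.drop_length, pvSpecGo.eq_1, ← hteq, hb]

-- ===== VERDICT (by name: the statement is the Claim_ definition above) =====
theorem find_homopolymer_spec : Claim_equal_find_homopolymer := by
  intro seq k _hdom hpre
  unfold Spec_find_homopolymer find_homopolymer find_homopolymer_alt
  have h := pvOuterA_spec k hpre (seq.toList.length + 1) [] seq.toList 0 0 0 0 0 (by omega)
  simp only [List.nil_append, List.length_nil, Int.natCast_zero] at h
  rw [h, pvScanB_none]
  rfl
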